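-- pv_equiv track=rewrite | github.com/nitinroger123/setpoint | backend/pool_playoff_helper.py | _standard_round1_pairings
-- ===== SOURCE A (Python) =====
-- from typing import Dict, List, Optional, Tuple
--
-- def _standard_round1_pairings(bracket_size: int) -> List[Tuple[int, int]]:
--     """
--     Return the standard single-elimination seed pairings for round 1,
--     ordered by bracket position (1-indexed).
--
--     Example for bracket_size=8:
--       position 1 → (seed 1, seed 8)
--       position 2 → (seed 4, seed 5)
--       position 3 → (seed 3, seed 6)
--       position 4 → (seed 2, seed 7)
--
--     Winners of positions 1 and 2 meet in the upper semifinal;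
--     winners of positions 3 and 4 meet in the lower semifinal.
--     """
--     if bracket_size == 2:
--         return [(1, 2)]
--     sub = _standard_round1_pairings(bracket_size // 2)
--     result: List[Tuple[int, int]] = []
--     for (a, b) in sub:
--         result.append((a, bracket_size + 1 - a))
--         result.append((b, bracket_size + 1 - b))
--     return result
-- ===== SOURCE B (Python) =====
-- from typing import Dict, List, Optional, Tuple
--
-- def _seed_order(size: int) -> List[int]:
--     """Flat seed ordering of the bracket slots, top to bottom."""
--     if size == 2:
--         return [1, 2]
--     sub = _seed_order(size // 2)
--     out: List[int] = []
--     for s in sub: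
--         out.append(s)
--         out.append(size + 1 - s)
--     return out
--
-- def _chunk2(xs: List[int]) -> List[Tuple[int, int]]:
--     """Group consecutive elements into pairs (single pass)."""
--     pairs: List[Tuple[int, int]] = []
--     pending: Optional[int] = None
--     for x in xs:
--         if pending is None:
--             pending = x
--         else:
--             pairs.append((pending, x))
--             pending = None
--     return pairs
--
-- def _standard_round1_pairings(bracket_size: int) -> List[Tuple[int, int]]:
--     return _chunk2(_seed_order(bracket_size))
-- ===== Notes on version B (the rewrite author's own statement) =====
-- stated objective: alternative
-- what changed: B computes the flat recursive seed ordering of the slots (each seed s expands to s, size+1-s) and then, in a separate recursive pass, groups consecutive elements into pairs, instead of A's recursion that rebuilds pairs of pairs.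
import Mathlib
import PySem

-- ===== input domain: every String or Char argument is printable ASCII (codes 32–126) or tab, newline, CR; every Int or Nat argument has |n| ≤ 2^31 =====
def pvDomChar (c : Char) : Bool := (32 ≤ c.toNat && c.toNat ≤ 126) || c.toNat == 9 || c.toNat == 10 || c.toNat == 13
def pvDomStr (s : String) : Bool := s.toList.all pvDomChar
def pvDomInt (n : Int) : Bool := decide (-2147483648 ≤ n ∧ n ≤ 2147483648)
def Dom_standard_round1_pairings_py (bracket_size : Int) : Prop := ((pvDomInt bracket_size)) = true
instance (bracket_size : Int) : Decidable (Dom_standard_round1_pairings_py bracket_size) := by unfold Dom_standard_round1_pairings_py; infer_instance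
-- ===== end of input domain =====

-- B replaces A's pairs-of-pairs recursion by a flat recursive seed ordering plus a
-- separate grouping pass (objective: alternative decomposition, same cost).

-- ===== PORT A =====
-- A's recursion on bracket_size // 2 does not terminate structurally on Int
-- (it recurses forever for non-powers-of-2, where Python raises RecursionError);
-- the fuel bracket_size.toNat only makes the recursion total and is never
-- exhausted on inputs satisfying Pre_ (where fuel = 2^k ≥ recursion depth).
def standard_round1_pairings_go (fuel : Nat) (n : Int) : List (Int × Int) :=
  match fuel with
  | 0 => []
  | fuel + 1 =>
    if n = 2 then [(1, 2)]
    else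
      let sub := standard_round1_pairings_go fuel (PySem.Int.floordiv n 2)
      sub.foldl (fun acc p => acc ++ [(p.1, n + 1 - p.1), (p.2, n + 1 - p.2)]) []

def standard_round1_pairings_py (bracket_size : Int) : List (Int × Int) :=
  standard_round1_pairings_go bracket_size.toNat bracket_size

-- ===== PORT B =====
-- same fuel device for B's _seed_order, whose Python recursion is identical in shape
def seed_order_alt (fuel : Nat) (n : Int) : List Int :=
  match fuel with
  | 0 => []
  | fuel + 1 =>
    if n = 2 then [1, 2]
    else
      let sub := seed_order_alt fuel (PySem.Int.floordiv n 2)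
      sub.foldl (fun acc s => acc ++ [s, n + 1 - s]) []

def chunk2_alt (xs : List Int) : List (Int × Int) :=
  (xs.foldl (fun st x =>
      match st.2 with
      | none => (st.1, some x)
      | some p => (st.1 ++ [(p, x)], none))
    (([] : List (Int × Int)), (none : Option Int))).1

def standard_round1_pairings_py_alt (bracket_size : Int) : List (Int × Int) :=
  chunk2_alt (seed_order_alt bracket_size.toNat bracket_size)

-- ===== PRECONDITION & SPEC =====
-- Pre_: repeated floor-halving of bracket_size hits exactly 2, i.e. bracket_size lies in
-- some band [2·2^j, 3·2^j) (j < 32 suffices within Dom); on every other input the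
-- Python A recurses forever on bracket_size // 2 and raises RecursionError.
def Pre_standard_round1_pairings_py (bracket_size : Int) : Prop :=
  ∃ j : Nat, j < 32 ∧ 2 * 2 ^ j ≤ bracket_size ∧ bracket_size < 3 * 2 ^ j
instance (bracket_size : Int) : Decidable (Pre_standard_round1_pairings_py bracket_size) := by
  unfold Pre_standard_round1_pairings_py; infer_instance

def pvWitness_standard_round1_pairings_py : Int := 8

def Spec_standard_round1_pairings_py (bracket_size : Int) (out : List (Int × Int)) : Prop :=
  out = standard_round1_pairings_py_alt bracket_size
instance (bracket_size : Int) (out : List (Int × Int)) : Decidable (Spec_standard_round1_pairings_py bracket_size out) := by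
  unfold Spec_standard_round1_pairings_py; infer_instance

-- ===== CLAIM =====
def Claim_equal_standard_round1_pairings_py : Prop :=
  ∀ (bracket_size : Int), Dom_standard_round1_pairings_py bracket_size →
    Pre_standard_round1_pairings_py bracket_size →
    Spec_standard_round1_pairings_py bracket_size (standard_round1_pairings_py bracket_size)

-- ===== LEMMAS AND PROOFS =====

-- the flattening that mediates between A's pair list and B's flat ordering
def pvFlat (ps : List (Int × Int)) : List Int := ps.flatMap (fun p => [p.1, p.2])

theorem chunk2_fold (ps : List (Int × Int)) (acc : List (Int × Int)) :
    (pvFlat ps).foldl (fun st x =>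
        match st.2 with
        | none => (st.1, some x)
        | some p => (st.1 ++ [(p, x)], none))
      (acc, (none : Option Int)) = (acc ++ ps, none) := by
  induction ps generalizing acc with
  | nil => simp [pvFlat]
  | cons p rest ih => simp [pvFlat] at *; simp [ih]

theorem chunk2_flat (ps : List (Int × Int)) : chunk2_alt (pvFlat ps) = ps := by
  simp [chunk2_alt, chunk2_fold]

theorem foldl_append_pairs (n : Int) (l : List (Int × Int)) (acc : List (Int × Int)) :
    l.foldl (fun acc p => acc ++ [(p.1, n + 1 - p.1), (p.2, n + 1 - p.2)]) acc
      = acc ++ l.flatMap (fun p => [(p.1, n + 1 - p.1), (p.2, n + 1 - p.2)]) := by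
  induction l generalizing acc with
  | nil => simp
  | cons p rest ih => simp [List.foldl, ih]

theorem foldl_append_seeds (n : Int) (l : List Int) (acc : List Int) :
    l.foldl (fun acc s => acc ++ [s, n + 1 - s]) acc
      = acc ++ l.flatMap (fun s => [s, n + 1 - s]) := by
  induction l generalizing acc with
  | nil => simp
  | cons s rest ih => simp [List.foldl, ih]

theorem flat_expand (n : Int) (l : List (Int × Int)) :
    (pvFlat l).flatMap (fun s => [s, n + 1 - s])
      = pvFlat (l.flatMap (fun p => [(p.1, n + 1 - p.1), (p.2, n + 1 - p.2)])) := by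
  induction l with
  | nil => rfl
  | cons p rest ih => simp [pvFlat] at *; simp [ih]

theorem seed_order_eq_flat_go (fuel : Nat) (n : Int) :
    seed_order_alt fuel n = pvFlat (standard_round1_pairings_go fuel n) := by
  induction fuel generalizing n with
  | zero => rfl
  | succ fuel ih =>
    by_cases h : n = 2
    · simp [seed_order_alt, standard_round1_pairings_go, h, pvFlat]
    · simp only [seed_order_alt, standard_round1_pairings_go, if_neg h,
        foldl_append_pairs, foldl_append_seeds, List.nil_append, ih]
      exact flat_expand n _

-- ===== VERDICT =====
theorem standard_round1_pairings_py_spec : Claim_equal_standard_round1_pairings_py := by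
  intro n _ _
  unfold Spec_standard_round1_pairings_py standard_round1_pairings_py standard_round1_pairings_py_alt
  rw [seed_order_eq_flat_go, chunk2_flat]
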